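-- pv_equiv track=rewrite | github.com/chytanyach/cric | utilities.py | find_final_squad
-- ===== SOURCE A (Python) =====
-- def find_final_squad(players):
--     squad1=[]
--     squad2=[]
--     final_squad = []
--     for x in players:
--         a = x.split(":")[1]
--         if (len(squad1) == 0):
--             squad1=a.split(",")
--         else:
--             squad2=a.split(",")
--     final_squad = squad1 + squad2
--     return final_squad
-- ===== SOURCE B (Python) =====
-- def find_final_squad(players):
--     # A's result is always split(first) + split(last); no need to scan the list.
--     if not players:
--         return []
--     first = players[0].split(":")[1].split(",")
--     if len(players) == 1:
--         return first
--     last = players[-1].split(":")[1].split(",")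
--     return first + last
-- ===== Notes on version B (the rewrite author's own statement) =====
-- stated objective: faster
-- what changed: B eliminates A's full scan with two mutating accumulators: it directly computes the splits of only the first and last players (the only ones A's answer depends on), handling the empty and singleton cases explicitly.
import Mathlib
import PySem

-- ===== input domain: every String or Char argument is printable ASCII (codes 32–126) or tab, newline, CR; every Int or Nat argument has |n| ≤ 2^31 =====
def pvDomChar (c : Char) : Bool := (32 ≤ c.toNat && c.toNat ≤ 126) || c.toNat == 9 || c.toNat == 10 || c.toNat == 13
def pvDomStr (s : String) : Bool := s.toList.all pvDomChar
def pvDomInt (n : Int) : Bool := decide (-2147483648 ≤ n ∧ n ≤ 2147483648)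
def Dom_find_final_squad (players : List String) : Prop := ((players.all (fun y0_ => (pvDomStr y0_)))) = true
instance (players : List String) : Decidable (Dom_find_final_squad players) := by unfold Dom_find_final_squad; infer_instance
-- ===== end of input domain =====

-- B skips A's full scan: the answer only depends on the first and last players, so B
-- computes just those two splits (asymptotically faster in the list length).

-- s.split(sep) for a nonempty sep (never raises; the `getD []` arm is unreachable)
def pySplit (s sep : String) : List String := (PySem.Str.split? s sep).getD []

-- ===== PORT A =====
-- A's loop keeps two accumulators (squad1, squad2); squad1 is filled on the first
-- iteration (an x.split(",") result is never empty), squad2 overwritten on each later one.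
def find_final_squad (players : List String) : List String :=
  let st := players.foldl
    (fun (st : List String × List String) x =>
      let a := PySem.List.pyGetD (pySplit x ":") 1 ""   -- x.split(":")[1], total under Pre_
      if st.1.length = 0 then (pySplit a ",", st.2)
      else (st.1, pySplit a ","))
    ([], [])
  st.1 ++ st.2

-- ===== PORT B =====
def find_final_squad_alt (players : List String) : List String :=
  if players = [] then []
  else
    let first := pySplit (PySem.List.pyGetD (pySplit (PySem.List.pyGetD players 0 "") ":") 1 "") ","
    if players.length = 1 then first
    else first ++ pySplit (PySem.List.pyGetD (pySplit (PySem.List.pyGetD players (-1) "") ":") 1 "") ","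

-- ===== PRECONDITION & SPEC =====
-- Pre_ excludes exactly the inputs where some player string contains no ':' — there
-- x.split(":")[1] raises IndexError in A.
def Pre_find_final_squad (players : List String) : Prop :=
  ∀ x ∈ players, 2 ≤ (pySplit x ":").length

instance (players : List String) : Decidable (Pre_find_final_squad players) := by
  unfold Pre_find_final_squad; infer_instance

def pvWitness_find_final_squad : List String := ["a:x,y", "b:z", "c:u,v"]

def Spec_find_final_squad (players : List String) (out : List String) : Prop := out = find_final_squad_alt players
instance (players : List String) (out : List String) : Decidable (Spec_find_final_squad players out) := by unfold Spec_find_final_squad; infer_instance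

-- ===== CLAIM (what is proved, stated in full; the proofs are below) =====
def Claim_equal_find_final_squad : Prop := ∀ (players : List String), Dom_find_final_squad players → Pre_find_final_squad players → Spec_find_final_squad players (find_final_squad players)

-- ===== LEMMAS AND PROOFS =====

-- the per-player extraction both programs apply
def pvPart (x : String) : List String :=
  pySplit (PySem.List.pyGetD (pySplit x ":") 1 "") ","

theorem splitOn_go_ne_nil (sep : List Char) (fuel : Nat) (l cur : List Char)
    (acc : List (List Char)) : PySem.Chars.splitOn.go sep fuel l cur acc ≠ [] := by
  induction fuel generalizing l cur acc with
  | zero => simp [PySem.Chars.splitOn.go]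
  | succ n ih =>
    cases l with
    | nil => simp [PySem.Chars.splitOn.go]
    | cons c rest =>
      rw [PySem.Chars.splitOn.go]
      split_ifs <;> exact ih _ _ _

theorem pySplit_comma_ne_nil (s : String) : pySplit s "," ≠ [] := by
  simp [pySplit, PySem.Str.split?, PySem.Chars.split?, PySem.Chars.splitOn]
  exact splitOn_go_ne_nil _ _ _ _ _

theorem pvPart_ne_nil (x : String) : pvPart x ≠ [] := pySplit_comma_ne_nil _

-- A's loop body, once squad1 is nonempty, only overwrites squad2 with the last part
theorem foldl_tail (rest : List String) (s1 s2 : List String) (h1 : s1 ≠ []) :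
    rest.foldl
      (fun (st : List String × List String) x =>
        if st.1.length = 0 then (pvPart x, st.2) else (st.1, pvPart x))
      (s1, s2)
    = (s1, if h : rest = [] then s2 else pvPart (rest.getLast h)) := by
  induction rest generalizing s2 with
  | nil => simp
  | cons r rs ih =>
    have hlen : ¬ s1.length = 0 := by simpa using h1
    rcases eq_or_ne rs ([] : List String) with hrs | hrs
    · subst hrs; simp [List.foldl, hlen]
    · simp only [List.foldl_cons, if_neg hlen, ih (pvPart r)]
      simp [hrs, List.getLast_cons hrs]

-- ===== VERDICT (by name: the statement is the Claim_ definition above) =====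
theorem find_final_squad_spec : Claim_equal_find_final_squad := by
  intro players _ _
  unfold Spec_find_final_squad find_final_squad find_final_squad_alt
  cases players with
  | nil => simp
  | cons p rest =>
    simp only [List.foldl_cons]
    have hstep :
        (fun (st : List String × List String) x =>
          let a := PySem.List.pyGetD (pySplit x ":") 1 ""
          if st.1.length = 0 then (pySplit a ",", st.2) else (st.1, pySplit a ","))
        = (fun (st : List String × List String) x =>
            if st.1.length = 0 then (pvPart x, st.2) else (st.1, pvPart x)) := rfl
    rw [hstep]
    simp only [List.length_nil, reduceIte]
    rw [show pySplit (PySem.List.pyGetD (pySplit p ":") 1 "") "," = pvPart p from rfl,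
      foldl_tail rest (pvPart p) [] (pvPart_ne_nil p)]
    rcases eq_or_ne rest ([] : List String) with hrs | hrs
    · subst hrs
      simp [PySem.List.pyGetD_zero_cons, pvPart]
    · obtain ⟨r0, rs0, hcons⟩ := List.exists_cons_of_ne_nil hrs
      subst hcons
      simp only [dif_neg hrs]
      simp [PySem.List.pyGetD_zero_cons, PySem.List.pyGetD_neg_one, pvPart,
        List.getLast_cons]
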